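-- pv_equiv track=rewrite | github.com/navigatorbuilds/elara-core | daemon/self_awareness.py | _generate_blind_spots_summary
-- ===== SOURCE A (Python) =====
-- def _generate_blind_spots_summary(spots: list) -> str:
--     """Natural language blind spots summary."""
--     if not spots:
--         return "No blind spots detected. Either we're on track, or I can't see what I can't see."
--
--     high = [s for s in spots if s["severity"] == "high"]
--     medium = [s for s in spots if s["severity"] == "medium"]
--
--     parts = [f"{len(spots)} blind spots found."]
--
--     if high:
--         parts.append(f"{len(high)} need attention:")
--         for s in high[:3]:
--             parts.append(f"  - {s['detail']}")
--
--     if medium: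
--         parts.append(f"{len(medium)} worth noting:")
--         for s in medium[:3]:
--             parts.append(f"  - {s['detail']}")
--
--     return "\n".join(parts)
-- ===== SOURCE B (Python) =====
-- def _generate_blind_spots_summary(spots: list) -> str:
--     """Natural language blind spots summary: one streaming pass with capped
--     accumulators, then direct string concatenation (no intermediate buckets,
--     no parts list, no join)."""
--     if not spots:
--         return "No blind spots detected. Either we're on track, or I can't see what I can't see."
--
--     n_high = 0
--     n_med = 0
--     high_details = []
--     med_details = []
--     for s in spots:
--         sev = s["severity"]
--         if sev == "high":
--             n_high += 1
--             if len(high_details) < 3: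
--                 high_details.append(s["detail"])
--         elif sev == "medium":
--             n_med += 1
--             if len(med_details) < 3:
--                 med_details.append(s["detail"])
--
--     out = f"{len(spots)} blind spots found."
--     if n_high:
--         out += f"\n{n_high} need attention:"
--         for d in high_details:
--             out += f"\n  - {d}"
--     if n_med:
--         out += f"\n{n_med} worth noting:"
--         for d in med_details:
--             out += f"\n  - {d}"
--     return out
-- ===== Notes on version B (the rewrite author's own statement) =====
-- stated objective: alternative
-- what changed: Replaces A's bucket materialization (two severity filters, a parts list sliced with [:3] and joined) with one streaming pass keeping only counts and capped (<=3) detail accumulators, then builds the result by direct string concatenation with no intermediate list or join.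
import Mathlib
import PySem

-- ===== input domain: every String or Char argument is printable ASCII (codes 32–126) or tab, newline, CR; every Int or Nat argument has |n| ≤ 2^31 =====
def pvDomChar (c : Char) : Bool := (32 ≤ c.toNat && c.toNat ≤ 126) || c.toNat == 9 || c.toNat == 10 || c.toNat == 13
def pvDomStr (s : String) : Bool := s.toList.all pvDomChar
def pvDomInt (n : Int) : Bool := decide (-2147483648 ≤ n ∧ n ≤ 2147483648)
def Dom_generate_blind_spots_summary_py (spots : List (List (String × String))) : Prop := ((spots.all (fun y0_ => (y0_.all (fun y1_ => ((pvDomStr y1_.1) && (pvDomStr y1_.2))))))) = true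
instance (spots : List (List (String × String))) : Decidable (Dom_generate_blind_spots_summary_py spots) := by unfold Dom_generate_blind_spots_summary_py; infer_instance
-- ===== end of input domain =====

-- B replaces A's two severity-filter buckets + parts list + join by one streaming pass with
-- capped (≤3) accumulators and direct string concatenation; same output on all of Pre_.

-- shared helper: s[k] for a Python dict, totalized with "" where Python raises KeyError (Pre_ excludes those inputs)
def spotGet (s : List (String × String)) (k : String) : String :=
  (PySem.Dict.mk s).getD k ""

-- ===== PORT A =====
def generate_blind_spots_summary_py (spots : List (List (String × String))) : String :=
  if spots.isEmpty then
    "No blind spots detected. Either we're on track, or I can't see what I can't see."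
  else
    let high := spots.filter (fun s => spotGet s "severity" == "high")
    let medium := spots.filter (fun s => spotGet s "severity" == "medium")
    let parts := [PySem.Int.toStr (spots.length : Int) ++ " blind spots found."]
    let parts :=
      if high.isEmpty then parts else
        (PySem.List.slice high none (some 3)).foldl
          (fun parts s => parts ++ ["  - " ++ spotGet s "detail"])
          (parts ++ [PySem.Int.toStr (high.length : Int) ++ " need attention:"])
    let parts :=
      if medium.isEmpty then parts else
        (PySem.List.slice medium none (some 3)).foldl
          (fun parts s => parts ++ ["  - " ++ spotGet s "detail"])
          (parts ++ [PySem.Int.toStr (medium.length : Int) ++ " worth noting:"])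
    PySem.Str.join "\n" parts

-- ===== PORT B =====
-- one pass over spots: (n_high, high_details, n_med, med_details), details capped at 3
def gbsStep (st : Nat × List String × Nat × List String) (s : List (String × String)) :
    Nat × List String × Nat × List String :=
  let sev := spotGet s "severity"
  if sev == "high" then
    (st.1 + 1, (if st.2.1.length < 3 then st.2.1 ++ [spotGet s "detail"] else st.2.1), st.2.2)
  else if sev == "medium" then
    (st.1, st.2.1, st.2.2.1 + 1,
      if st.2.2.2.length < 3 then st.2.2.2 ++ [spotGet s "detail"] else st.2.2.2)
  else st

def generate_blind_spots_summary_py_alt (spots : List (List (String × String))) : String :=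
  if spots.isEmpty then
    "No blind spots detected. Either we're on track, or I can't see what I can't see."
  else
    let st := spots.foldl gbsStep (0, [], 0, [])
    let out := PySem.Int.toStr (spots.length : Int) ++ " blind spots found."
    let out :=
      if st.1 ≠ 0 then
        st.2.1.foldl (fun a d => a ++ ("\n" ++ ("  - " ++ d)))
          (out ++ ("\n" ++ (PySem.Int.toStr (st.1 : Int) ++ " need attention:")))
      else out
    let out :=
      if st.2.2.1 ≠ 0 then
        st.2.2.2.foldl (fun a d => a ++ ("\n" ++ ("  - " ++ d)))
          (out ++ ("\n" ++ (PySem.Int.toStr (st.2.2.1 : Int) ++ " worth noting:")))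
      else out
    out

-- ===== PRECONDITION & SPEC =====
-- Pre_ = exactly the inputs where Python A returns: every spot carries a "severity" key, and the
-- first three spots of the high bucket and of the medium bucket carry a "detail" key (only those are read).
def Pre_generate_blind_spots_summary_py (spots : List (List (String × String))) : Prop :=
  spots = [] ∨
    ((∀ s ∈ spots, (PySem.Dict.mk s).contains "severity" = true) ∧
     (∀ s ∈ (spots.filter (fun s => spotGet s "severity" == "high")).take 3,
        (PySem.Dict.mk s).contains "detail" = true) ∧
     (∀ s ∈ (spots.filter (fun s => spotGet s "severity" == "medium")).take 3,
        (PySem.Dict.mk s).contains "detail" = true))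
instance (spots : List (List (String × String))) : Decidable (Pre_generate_blind_spots_summary_py spots) := by
  unfold Pre_generate_blind_spots_summary_py; infer_instance

def pvWitness_generate_blind_spots_summary_py : (List (List (String × String))) :=
  [[("severity", "high"), ("detail", "x")], [("severity", "low")]]

def Spec_generate_blind_spots_summary_py (spots : List (List (String × String))) (out : String) : Prop := out = generate_blind_spots_summary_py_alt spots
instance (spots : List (List (String × String))) (out : String) : Decidable (Spec_generate_blind_spots_summary_py spots out) := by unfold Spec_generate_blind_spots_summary_py; infer_instance

-- ===== CLAIM (what is proved, stated in full; the proofs are below) =====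
def Claim_equal_generate_blind_spots_summary_py : Prop := ∀ (spots : List (List (String × String))), Dom_generate_blind_spots_summary_py spots → Pre_generate_blind_spots_summary_py spots → Spec_generate_blind_spots_summary_py spots (generate_blind_spots_summary_py spots)

-- ===== LEMMAS AND PROOFS =====

-- B's single fold computes A's bucket lengths and the details of the first three of each bucket.
lemma gbsStep_foldl (spots : List (List (String × String)))
    (nH : Nat) (dH : List String) (nM : Nat) (dM : List String) :
    spots.foldl gbsStep (nH, dH, nM, dM) =
      (nH + (spots.filter (fun s => spotGet s "severity" == "high")).length,
       dH ++ ((spots.filter (fun s => spotGet s "severity" == "high")).map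
                (fun s => spotGet s "detail")).take (3 - dH.length),
       nM + (spots.filter (fun s => spotGet s "severity" == "medium")).length,
       dM ++ ((spots.filter (fun s => spotGet s "severity" == "medium")).map
                (fun s => spotGet s "detail")).take (3 - dM.length)) := by
  induction spots generalizing nH dH nM dM with
  | nil => simp
  | cons s rest ih =>
    rw [List.foldl_cons]
    by_cases hH : spotGet s "severity" == "high"
    · have hM : (spotGet s "severity" == "medium") = false := by
        simp only [beq_iff_eq] at hH ⊢; simp [hH]
      by_cases hlt : dH.length < 3
      · obtain ⟨k, hk⟩ : ∃ k, 3 - dH.length = k + 1 := ⟨3 - dH.length - 1, by omega⟩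
        have hk2 : 3 - (dH ++ [spotGet s "detail"]).length = k := by simp; omega
        have hs : gbsStep (nH, dH, nM, dM) s = (nH + 1, dH ++ [spotGet s "detail"], nM, dM) := by
          simp [gbsStep, hH, hlt]
        rw [hs, ih, hk2,
          List.filter_cons_of_pos (p := fun s => spotGet s "severity" == "high") (by simpa using hH),
          List.filter_cons_of_neg (p := fun s => spotGet s "severity" == "medium") (by simpa using hM),
          List.map_cons, hk, List.take_succ_cons]
        simp [Nat.add_assoc, List.append_assoc]
        all_goals omega
      · have hs : gbsStep (nH, dH, nM, dM) s = (nH + 1, dH, nM, dM) := by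
          simp [gbsStep, hH, hlt]
        have h3 : 3 - dH.length = 0 := by omega
        rw [hs, ih,
          List.filter_cons_of_pos (p := fun s => spotGet s "severity" == "high") (by simpa using hH),
          List.filter_cons_of_neg (p := fun s => spotGet s "severity" == "medium") (by simpa using hM)]
        simp [h3, Nat.add_assoc]
        all_goals omega
    · by_cases hM : spotGet s "severity" == "medium"
      · by_cases hlt : dM.length < 3
        · obtain ⟨k, hk⟩ : ∃ k, 3 - dM.length = k + 1 := ⟨3 - dM.length - 1, by omega⟩
          have hk2 : 3 - (dM ++ [spotGet s "detail"]).length = k := by simp; omega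
          have hs : gbsStep (nH, dH, nM, dM) s = (nH, dH, nM + 1, dM ++ [spotGet s "detail"]) := by
            simp [gbsStep, hH, hM, hlt]
          rw [hs, ih, hk2,
            List.filter_cons_of_pos (p := fun s => spotGet s "severity" == "medium") (by simpa using hM),
            List.filter_cons_of_neg (p := fun s => spotGet s "severity" == "high") (by simpa using hH),
            List.map_cons, hk, List.take_succ_cons]
          simp [Nat.add_assoc, List.append_assoc]
          all_goals omega
        · have hs : gbsStep (nH, dH, nM, dM) s = (nH, dH, nM + 1, dM) := by
            simp [gbsStep, hH, hM, hlt]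
          have h3 : 3 - dM.length = 0 := by omega
          rw [hs, ih,
            List.filter_cons_of_pos (p := fun s => spotGet s "severity" == "medium") (by simpa using hM),
            List.filter_cons_of_neg (p := fun s => spotGet s "severity" == "high") (by simpa using hH)]
          simp [h3, Nat.add_assoc]
          all_goals omega
      · have hs : gbsStep (nH, dH, nM, dM) s = (nH, dH, nM, dM) := by
          simp [gbsStep, hH, hM]
        rw [hs, ih,
          List.filter_cons_of_neg (p := fun s => spotGet s "severity" == "high") (by simpa using hH),
          List.filter_cons_of_neg (p := fun s => spotGet s "severity" == "medium") (by simpa using hM)]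

-- a prefix moves into the fold's accumulator (String.append is associative)
lemma foldl_prepend (l : List String) (p a : String) :
    p ++ l.foldl (fun a y => a ++ ("\n" ++ y)) a
      = l.foldl (fun a y => a ++ ("\n" ++ y)) (p ++ a) := by
  induction l generalizing a with
  | nil => rfl
  | cons y ys ih => simp only [List.foldl_cons]; rw [ih, String.append_assoc]

-- "\n".join(x :: l) is left-folded concatenation starting from x.
lemma join_cons_foldl (x : String) (l : List String) :
    PySem.Str.join "\n" (x :: l) = l.foldl (fun a y => a ++ ("\n" ++ y)) x := by
  induction l generalizing x with
  | nil => simp [PySem.Str.join, PySem.Chars.join_singleton]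
  | cons y ys ih =>
    have step : PySem.Str.join "\n" (x :: y :: ys)
        = x ++ ("\n" ++ PySem.Str.join "\n" (y :: ys)) := by
      simp only [PySem.Str.join, List.map_cons]
      rw [PySem.Chars.join_cons_cons, List.append_assoc, String.ofList_append,
        String.ofList_append, String.ofList_toList]
      rfl
    rw [step, ih, List.foldl_cons, ← String.append_assoc, foldl_prepend, String.append_assoc]

-- xs[:3] is take 3
lemma slice3 {α : Type} (xs : List α) : PySem.List.slice xs none (some 3) = xs.take 3 := by
  rw [PySem.List.slice_to xs (by omega)]; rfl

theorem generate_blind_spots_summary_py_spec : Claim_equal_generate_blind_spots_summary_py := by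
  intro spots _ _
  show generate_blind_spots_summary_py spots = generate_blind_spots_summary_py_alt spots
  unfold generate_blind_spots_summary_py generate_blind_spots_summary_py_alt
  by_cases h : spots.isEmpty
  · simp [h]
  · simp only [h, Bool.false_eq_true, if_false, gbsStep_foldl, Nat.zero_add, List.nil_append,
      Nat.sub_zero, List.length_nil, PySem.List.foldl_append_singleton_eq_map,
      slice3, ← List.map_take,
      List.foldl_map, List.length_eq_zero_iff, List.isEmpty_iff, List.take_eq_nil_iff,
      ne_eq]
    by_cases hh : spots.filter (fun s => spotGet s "severity" == "high") = []
    · by_cases hm : spots.filter (fun s => spotGet s "severity" == "medium") = []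
      · simp [hh, hm, join_cons_foldl]
      · simp only [hh, hm, if_neg, if_pos, List.length_eq_zero_iff, not_false_iff]
        simp [hh, hm, join_cons_foldl, List.foldl_append, ← List.map_take, List.foldl_map]
    · by_cases hm : spots.filter (fun s => spotGet s "severity" == "medium") = []
      · simp [hh, hm, join_cons_foldl, List.foldl_append, ← List.map_take, List.foldl_map]
      · simp [hh, hm, join_cons_foldl, List.foldl_append, ← List.map_take, List.foldl_map]
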